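-- pv_equiv track=rewrite | github.com/SamuelSlavik/ivs_project_2 | src/math_lib_interface.py | _sub_unary_minus
-- ===== SOURCE A (Python) =====
-- def _is_numeric(expression):
--     try:
--         float(expression)
--         return True
--     except ValueError:
--         return False
--
-- def _sub_unary_minus(expression):
--     idx = 0
--     for item in expression:
--         if item == '-' and (idx == 0 or not _is_numeric(expression[idx - 1])):
--             expression = list(expression)
--             expression[idx] = 'ˇ'
--             expression = ''.join(expression)
--         idx += 1
--
--     return expression
-- ===== SOURCE B (Python) =====
-- import re
--
-- _UNARY_MINUS_RE = re.compile(r'(?<![0-9])-')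
--
-- def _sub_unary_minus(expression):
--     # a '-' is unary iff it is at the start or the preceding character is not a
--     # single-char float literal; among printable ASCII those are exactly 0-9
--     return _UNARY_MINUS_RE.sub('\u02c7', expression)
-- ===== Notes on version B (the rewrite author's own statement) =====
-- stated objective: idiomatic
-- what changed: Replaced the index loop that rebuilds the string via list()/join on every hit (re-reading the mutated string for the lookbehind test) by a single compiled-regex substitution of '-' with a negative lookbehind for a digit.
import Mathlib
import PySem

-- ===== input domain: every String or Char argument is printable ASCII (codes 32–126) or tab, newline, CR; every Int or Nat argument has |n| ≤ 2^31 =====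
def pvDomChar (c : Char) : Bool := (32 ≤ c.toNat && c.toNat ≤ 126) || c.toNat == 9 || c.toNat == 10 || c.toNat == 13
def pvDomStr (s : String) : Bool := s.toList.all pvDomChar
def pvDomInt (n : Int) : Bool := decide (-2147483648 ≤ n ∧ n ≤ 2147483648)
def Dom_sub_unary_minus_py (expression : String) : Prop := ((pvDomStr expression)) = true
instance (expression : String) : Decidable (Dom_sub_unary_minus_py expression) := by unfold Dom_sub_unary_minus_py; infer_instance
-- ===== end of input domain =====

-- B replaces A's index loop (which rebuilds the string via list/join on every hit) by a
-- single regex substitution `(?<![0-9])-` → 'ˇ'; objective: idiomatic.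

-- ===== PORT A =====
-- _is_numeric applied to a one-character string slice: float(c) parses exactly the
-- decimal digits '0'..'9' among the characters that can occur here (Dom chars plus 'ˇ').
def pvIsNumeric1 (c : Char) : Bool := c.isDigit

-- the for loop: items come from the original string, cs is the current (mutated) string
def pvALoop (items : List Char) (idx : Nat) (cs : List Char) : List Char :=
  match items with
  | [] => cs
  | item :: rest =>
      let cs' := if item = '-' ∧ (idx = 0 ∨ ¬ pvIsNumeric1 (cs.getD (idx - 1) ' ') = true)
                 then cs.set idx 'ˇ' else cs   -- expression[idx-1] is always in range here
      pvALoop rest (idx + 1) cs'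

def sub_unary_minus_py (expression : String) : String :=
  String.mk (pvALoop expression.toList 0 expression.toList)

-- ===== PORT B =====
-- Source B is one call `re.sub(r'(?<![0-9])-', 'ˇ', expression)`; Lean has no regex, so the
-- substitution is ported by hand, exact for this pattern: one left-to-right pass over the
-- ORIGINAL characters, replacing each '-' whose predecessor is not an ASCII digit.
-- lookbehind test: no predecessor, or predecessor is not an ASCII digit
def pvNoDigitBefore (prev : Option Char) : Bool :=
  match prev with
  | none => true
  | some p => !p.isDigit

def pvBGo (prev : Option Char) (cs : List Char) : List Char :=
  match cs with
  | [] => []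
  | c :: rest =>
      (if c = '-' ∧ pvNoDigitBefore prev = true then 'ˇ' else c) :: pvBGo (some c) rest

def sub_unary_minus_py_alt (expression : String) : String :=
  String.mk (pvBGo none expression.toList)

-- ===== PRECONDITION & SPEC =====
def Spec_sub_unary_minus_py (expression : String) (out : String) : Prop := out = sub_unary_minus_py_alt expression
instance (expression : String) (out : String) : Decidable (Spec_sub_unary_minus_py expression out) := by unfold Spec_sub_unary_minus_py; infer_instance

-- ===== CLAIM (what is proved, stated in full; the proofs are below) =====
def Claim_equal_sub_unary_minus_py : Prop := ∀ (expression : String), Dom_sub_unary_minus_py expression → Spec_sub_unary_minus_py expression (sub_unary_minus_py expression)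

-- ===== LEMMAS AND PROOFS =====

lemma pv_getD_append_last (done : List Char) (l : List Char) (c : Char) (d : Char)
    (h : done.getLast? = some c) :
    (done ++ l).getD (done.length - 1) d = c := by
  induction done generalizing l with
  | nil => simp at h
  | cons a t ih =>
    cases t with
    | nil => simp_all [List.getLast?]
    | cons b t' =>
      have h' : (b :: t').getLast? = some c := by
        simpa [List.getLast?_cons_cons] using h
      have := ih (l := l) h'
      simpa [List.getD, List.length_cons, Nat.succ_sub_one] using this

lemma pv_set_append (done : List Char) (c : Char) (rest : List Char) (x : Char) :
    (done ++ c :: rest).set done.length x = done ++ x :: rest := by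
  induction done with
  | nil => simp
  | cons a t ih => simp [ih]

-- A's loop invariant: cs = done ++ rest where done is the already-transformed prefix,
-- and prev (B's lookbehind state) has the same digit-ness as done's last character.
lemma pv_loop_eq (rest : List Char) :
    ∀ (done : List Char) (prev : Option Char),
    (match prev, done.getLast? with
      | none, none => True
      | some p, some d => p.isDigit = d.isDigit
      | _, _ => False) →
    pvALoop rest done.length (done ++ rest) = done ++ pvBGo prev rest := by
  induction rest with
  | nil => intro done prev _; simp [pvALoop, pvBGo]
  | cons item tail ih =>
    intro done prev hrel
    have hcond :
        (item = '-' ∧ (done.length = 0 ∨ ¬ pvIsNumeric1 ((done ++ item :: tail).getD (done.length - 1) ' ') = true))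
        ↔ (item = '-' ∧ pvNoDigitBefore prev = true) := by
      cases prev with
      | none =>
        cases hd : done.getLast? with
        | none =>
          have : done = [] := by
            cases done with
            | nil => rfl
            | cons a t => simp [List.getLast?_eq_none_iff] at hd
          subst this; simp [pvNoDigitBefore]
        | some d => rw [hd] at hrel; simp at hrel
      | some p =>
        cases hd : done.getLast? with
        | none => rw [hd] at hrel; simp at hrel
        | some d =>
          rw [hd] at hrel
          have hne : done ≠ [] := by
            intro h; subst h; simp at hd
          have hlen : done.length ≠ 0 := by simpa [List.length_eq_zero_iff] using hne
          rw [pv_getD_append_last done (item :: tail) d ' ' hd]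
          simp only [pvIsNumeric1, pvNoDigitBefore, hrel, hlen, Bool.not_eq_true']
          constructor
          · rintro ⟨h1, h2⟩
            refine ⟨h1, ?_⟩
            rcases h2 with h2 | h2
            · exact h2.elim
            · simpa [hrel] using h2
          · rintro ⟨h1, h2⟩
            exact ⟨h1, Or.inr (by simpa [hrel] using h2)⟩
    by_cases hc : item = '-' ∧ pvNoDigitBefore prev = true
    · have hc' := hcond.mpr hc
      rw [pvALoop, pvBGo]
      simp only [if_pos hc', if_pos hc]
      rw [pv_set_append]
      have hlast : (done ++ ['ˇ']).getLast? = some 'ˇ' := by simp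
      have hlen1 : done.length + 1 = (done ++ ['ˇ']).length := by simp
      rw [show done ++ 'ˇ' :: tail = (done ++ ['ˇ']) ++ tail by simp, hlen1,
          ih (done ++ ['ˇ']) (some item) (by rw [hlast, hc.1]; decide)]
      simp
    · have hc' := (not_iff_not.mpr hcond).mpr hc
      rw [pvALoop, pvBGo]
      simp only [if_neg hc', if_neg hc]
      have hlast : (done ++ [item]).getLast? = some item := by simp
      have hlen1 : done.length + 1 = (done ++ [item]).length := by simp
      rw [show done ++ item :: tail = (done ++ [item]) ++ tail by simp, hlen1,
          ih (done ++ [item]) (some item) (by rw [hlast])]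
      simp

-- ===== VERDICT (by name: the statement is the Claim_ definition above) =====
theorem sub_unary_minus_py_spec : Claim_equal_sub_unary_minus_py := by
  intro expression _
  show _ = _
  unfold sub_unary_minus_py sub_unary_minus_py_alt
  have := pv_loop_eq expression.toList [] none (by simp)
  simp only [List.length_nil, List.nil_append] at this
  exact congrArg String.mk this
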